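-- pv_equiv track=rewrite | github.com/SALT-NLP/CAVA | data_collection/FunctionalCall/fairseq_to_hf.py | get_insl_frame
-- ===== SOURCE A (Python) =====
-- def get_insl_frame(parse):
--     """Convert a parse string to the format required by fairseq."""
--     res = []
--     x = []
--     for tok in parse.split():
--         if tok[0] in ["[", "]"]:
--             if x:
--                 res.append('_'.join(x))
--                 x = []
--             res.append(tok.upper())
--         else:
--             x.append(tok.upper())
--     if x:  # Handle any remaining tokens
--         res.append('_'.join(x))
--     return " ".join(res) + ' | '
-- ===== SOURCE B (Python) =====
-- def get_insl_frame(parse):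
--     """Convert a parse string to the format required by fairseq."""
--     toks = parse.split()
--     res = []
--     while toks:
--         if toks[0][0] in '[]':
--             res.append(toks[0].upper())
--             toks = toks[1:]
--         else:
--             k = 1
--             while k < len(toks) and toks[k][0] not in '[]':
--                 k += 1
--             res.append('_'.join(t.upper() for t in toks[:k]))
--             toks = toks[k:]
--     return ' '.join(res) + ' | '
-- ===== Notes on version B (the rewrite author's own statement) =====
-- stated objective: alternative
-- what changed: Replaced A's accumulator-and-flush loop (pending word list x flushed at each bracket and at the end) with a run-scanning loop that consumes each maximal non-bracket run at once and joins it with underscores directly.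
import Mathlib
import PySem

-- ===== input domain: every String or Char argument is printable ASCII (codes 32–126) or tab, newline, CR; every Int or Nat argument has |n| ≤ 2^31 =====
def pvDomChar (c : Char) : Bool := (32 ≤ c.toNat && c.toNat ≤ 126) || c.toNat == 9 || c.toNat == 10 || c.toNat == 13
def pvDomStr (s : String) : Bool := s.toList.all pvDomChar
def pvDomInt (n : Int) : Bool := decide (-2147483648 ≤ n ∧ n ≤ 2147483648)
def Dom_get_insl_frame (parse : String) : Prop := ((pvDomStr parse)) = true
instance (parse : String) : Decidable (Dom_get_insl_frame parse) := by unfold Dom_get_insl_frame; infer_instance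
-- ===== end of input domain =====

-- B replaces A's accumulator-and-flush single pass by a run-scanning loop (take/drop the
-- maximal non-bracket run at once); objective: alternative decomposition, same cost.

-- ===== PORT A =====
-- tok[0] in ["[", "]"]: tokens from split() are nonempty, so headD is exact here
def pvIsBr (t : List Char) : Bool := t.headD ' ' == '[' || t.headD ' ' == ']'

-- one iteration of A's for-loop over state (res, x)
def pvStepA (st : List (List Char) × List (List Char)) (tok : List Char) :
    List (List Char) × List (List Char) :=
  if pvIsBr tok then
    ((if st.2 ≠ [] then st.1 ++ [PySem.Chars.join ['_'] st.2] else st.1) ++ [PySem.Chars.upper tok], [])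
  else
    (st.1, st.2 ++ [PySem.Chars.upper tok])

def get_insl_frame (parse : String) : String :=
  let st := (PySem.Chars.split₀ parse.toList).foldl pvStepA ([], [])
  let res := if st.2 ≠ [] then st.1 ++ [PySem.Chars.join ['_'] st.2] else st.1
  String.ofList (PySem.Chars.join [' '] res ++ (' ' :: '|' :: ' ' :: []))

-- ===== PORT B =====
-- the while-loop of Source B: bracket head goes out alone, otherwise the maximal
-- non-bracket run (the inner k-scan = takeWhile/dropWhile) is joined with '_'
def pvGoB : List (List Char) → List (List Char)
  | [] => []
  | t :: rest =>
    if h : pvIsBr t then PySem.Chars.upper t :: pvGoB rest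
    else
      PySem.Chars.join ['_'] (((t :: rest).takeWhile (fun w => !pvIsBr w)).map PySem.Chars.upper)
        :: pvGoB ((t :: rest).dropWhile (fun w => !pvIsBr w))
  termination_by l => l.length
  decreasing_by
    · simp
    · simp only [List.dropWhile_cons, h, Bool.not_false, if_pos, List.length_cons]
      exact Nat.lt_succ_of_le (List.length_dropWhile_le _ _)

def get_insl_frame_alt (parse : String) : String :=
  String.ofList (PySem.Chars.join [' '] (pvGoB (PySem.Chars.split₀ parse.toList)) ++ (' ' :: '|' :: ' ' :: []))

-- ===== PRECONDITION & SPEC =====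
def Spec_get_insl_frame (parse : String) (out : String) : Prop := out = get_insl_frame_alt parse
instance (parse : String) (out : String) : Decidable (Spec_get_insl_frame parse out) := by unfold Spec_get_insl_frame; infer_instance

-- ===== CLAIM (what is proved, stated in full; the proofs are below) =====
def Claim_equal_get_insl_frame : Prop := ∀ (parse : String), Dom_get_insl_frame parse → Spec_get_insl_frame parse (get_insl_frame parse)

-- ===== LEMMAS AND PROOFS =====

-- A's fold from state (res, x), with the final flush applied
def pvFinA (toks : List (List Char)) (res x : List (List Char)) : List (List Char) :=
  let st := toks.foldl pvStepA (res, x)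
  if st.2 ≠ [] then st.1 ++ [PySem.Chars.join ['_'] st.2] else st.1

lemma pvGoB_nil : pvGoB [] = [] := by rw [pvGoB]

lemma pvGoB_br {t : List Char} (rest : List (List Char)) (h : pvIsBr t) :
    pvGoB (t :: rest) = PySem.Chars.upper t :: pvGoB rest := by
  rw [pvGoB]; simp [h]

lemma pvGoB_word {t : List Char} (rest : List (List Char)) (h : ¬ pvIsBr t) :
    pvGoB (t :: rest) =
      PySem.Chars.join ['_'] (((t :: rest).takeWhile (fun w => !pvIsBr w)).map PySem.Chars.upper)
        :: pvGoB ((t :: rest).dropWhile (fun w => !pvIsBr w)) := by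
  rw [pvGoB]; simp [h]

-- the pending accumulator x of A merges with the leading non-bracket run of B
lemma pvFinA_eq (toks : List (List Char)) : ∀ res x : List (List Char),
    pvFinA toks res x =
      res ++ (if x = [] then pvGoB toks
        else PySem.Chars.join ['_'] (x ++ (toks.takeWhile (fun w => !pvIsBr w)).map PySem.Chars.upper)
          :: pvGoB (toks.dropWhile (fun w => !pvIsBr w))) := by
  induction toks with
  | nil =>
    intro res x
    by_cases hx : x = [] <;> simp [pvFinA, pvGoB_nil, hx]
  | cons t ts ih =>
    intro res x
    by_cases hb : pvIsBr t
    · have step : pvStepA (res, x) t =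
        ((if x ≠ [] then res ++ [PySem.Chars.join ['_'] x] else res) ++ [PySem.Chars.upper t], []) := by
        simp [pvStepA, hb]
      have : pvFinA (t :: ts) res x =
          pvFinA ts ((if x ≠ [] then res ++ [PySem.Chars.join ['_'] x] else res) ++ [PySem.Chars.upper t]) [] := by
        simp [pvFinA, step]
      rw [this, ih]
      by_cases hx : x = [] <;>
        simp [hx, pvGoB_br ts hb, hb]
    · have step : pvStepA (res, x) t = (res, x ++ [PySem.Chars.upper t]) := by
        simp [pvStepA, hb]
      have : pvFinA (t :: ts) res x = pvFinA ts res (x ++ [PySem.Chars.upper t]) := by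
        simp [pvFinA, step]
      rw [this, ih]
      have hx' : x ++ [PySem.Chars.upper t] ≠ [] := by simp
      by_cases hx : x = []
      · simp [hx, pvGoB_word ts hb, hb]
      · simp [hx, hx', hb]

-- ===== VERDICT (by name: the statement is the Claim_ definition above) =====
theorem get_insl_frame_spec : Claim_equal_get_insl_frame := by
  intro parse _
  show get_insl_frame parse = get_insl_frame_alt parse
  have h := pvFinA_eq (PySem.Chars.split₀ parse.toList) [] []
  simp at h
  simp [get_insl_frame, get_insl_frame_alt, ← h, pvFinA]
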